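-- pv_equiv track=rewrite | github.com/Ilmosal/NorDB | nordb/core/nordicSearch.py | rangeOfEventType
-- ===== SOURCE A (Python) =====
-- EVENT_TYPE_VALS = {'O':1,
--                     'A':2,
--                     'R':3,
--                     'P':4,
--                     'F':5,
--                     'S':6}
--
-- def rangeOfEventType(eveb, evet):
--     """
--     Method for getting all event types in range as a string.
--
--     :param str eveb: Bottom limit of event types
--     :param str evet: Top limit of event types
--     :return: String of all event types
--     """
--     bot = EVENT_TYPE_VALS[eveb]
--     top = EVENT_TYPE_VALS[evet]
--
--     events = ""
--
--     for key in EVENT_TYPE_VALS.keys():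
--         if EVENT_TYPE_VALS[key] >= bot and EVENT_TYPE_VALS[key] <= top:
--             events += key
--
--     return events
-- ===== SOURCE B (Python) =====
-- EVENT_TYPE_VALS = {'O':1,
--                     'A':2,
--                     'R':3,
--                     'P':4,
--                     'F':5,
--                     'S':6}
--
-- def rangeOfEventType(eveb, evet):
--     bot = EVENT_TYPE_VALS[eveb]
--     top = EVENT_TYPE_VALS[evet]
--     # keys are valued 1..6 in insertion order, so the in-range keys
--     # form a contiguous slice of the ordered key string
--     return "OARPFS"[bot-1:top]
-- ===== Notes on version B (the rewrite author's own statement) =====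
-- stated objective: simpler
-- what changed: Replaces the per-key loop with a range test by a closed-form slice of the ordered key string 'OARPFS', exploiting that the six keys map to 1..6 in insertion order; Pre_ excludes only inputs where both versions raise KeyError.
import Mathlib
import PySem

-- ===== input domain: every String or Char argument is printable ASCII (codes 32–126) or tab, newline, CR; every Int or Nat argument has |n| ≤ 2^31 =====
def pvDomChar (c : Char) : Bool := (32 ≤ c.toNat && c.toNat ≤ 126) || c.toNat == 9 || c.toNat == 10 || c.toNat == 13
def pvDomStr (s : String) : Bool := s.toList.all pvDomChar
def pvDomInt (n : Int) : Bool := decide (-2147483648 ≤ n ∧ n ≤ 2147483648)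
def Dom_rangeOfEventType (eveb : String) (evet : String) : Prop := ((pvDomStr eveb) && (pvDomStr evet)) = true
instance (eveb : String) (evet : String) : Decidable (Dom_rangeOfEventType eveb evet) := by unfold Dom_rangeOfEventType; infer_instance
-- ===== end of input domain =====

-- B replaces A's loop over the dict keys by a closed-form slice of the ordered key string "OARPFS" (objective: simpler).

-- ===== PORT A =====
-- EVENT_TYPE_VALS, the module-level dict both versions use
def pvEventTypeVals : PySem.Dict String Int :=
  PySem.Dict.ofList [("O",1),("A",2),("R",3),("P",4),("F",5),("S",6)]

def rangeOfEventType (eveb : String) (evet : String) : String :=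
  match pvEventTypeVals.get? eveb, pvEventTypeVals.get? evet with
  | some bot, some top =>
      -- for key in EVENT_TYPE_VALS.keys(): if bot <= EVENT_TYPE_VALS[key] <= top: events += key
      String.ofList (pvEventTypeVals.keys.foldl (fun events key =>
        if pvEventTypeVals.getD key 0 ≥ bot ∧ pvEventTypeVals.getD key 0 ≤ top
        then events ++ key.toList else events) [])
  | _, _ => ""  -- KeyError: excluded by Pre_

-- ===== PORT B =====
-- B's own copy of EVENT_TYPE_VALS
def pvEventTypeValsB : PySem.Dict String Int :=
  PySem.Dict.ofList [("O",1),("A",2),("R",3),("P",4),("F",5),("S",6)]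

def rangeOfEventType_alt (eveb : String) (evet : String) : String :=
  (((pvEventTypeValsB.get? eveb).bind (fun bot =>
      (pvEventTypeValsB.get? evet).map (fun top =>
        String.ofList (PySem.List.slice "OARPFS".toList (some (bot - 1)) (some top))))).getD
    "")  -- KeyError (none): excluded by Pre_

-- ===== PRECONDITION & SPEC =====
-- Pre_ excludes exactly the inputs where the Python A raises KeyError (either limit not a key of EVENT_TYPE_VALS)
def Pre_rangeOfEventType (eveb : String) (evet : String) : Prop :=
  eveb ∈ ["O","A","R","P","F","S"] ∧ evet ∈ ["O","A","R","P","F","S"]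
instance (eveb : String) (evet : String) : Decidable (Pre_rangeOfEventType eveb evet) := by unfold Pre_rangeOfEventType; infer_instance
def pvWitness_rangeOfEventType : String × String := ("A", "F")

def Spec_rangeOfEventType (eveb : String) (evet : String) (out : String) : Prop := out = rangeOfEventType_alt eveb evet
instance (eveb : String) (evet : String) (out : String) : Decidable (Spec_rangeOfEventType eveb evet out) := by unfold Spec_rangeOfEventType; infer_instance

-- ===== CLAIM (what is proved, stated in full; the proofs are below) =====
def Claim_equal_rangeOfEventType : Prop := ∀ (eveb : String) (evet : String), Dom_rangeOfEventType eveb evet → Pre_rangeOfEventType eveb evet → Spec_rangeOfEventType eveb evet (rangeOfEventType eveb evet)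

-- ===== LEMMAS AND PROOFS =====

-- ===== VERDICT (by name: the statement is the Claim_ definition above) =====
theorem rangeOfEventType_spec : Claim_equal_rangeOfEventType := by
  intro eveb evet _ hpre
  obtain ⟨h1, h2⟩ := hpre
  fin_cases h1 <;> fin_cases h2 <;> decide
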